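-- pv_equiv track=rewrite | github.com/BozhidarHr01/PythonStrypes | small homeworks/hw10.py | fib_range
-- ===== SOURCE A (Python) =====
-- def fib_range(start, end):
--     saved = {}
--
--     def fib(n):
--         if n in saved:
--             return saved[n]
--         if n <= 1:
--             result = n
--         else:
--             result = fib(n - 1) + fib(n - 2)
--
--         saved[n] = result
--         return result
--
--     result = []
--     for i in range(start - 1, end):
--         result.append(str(fib(i)))
--
--     return " ".join(result)
-- ===== SOURCE B (Python) =====
-- def fib_range(start, end):
--     parts = []
--     prev, cur = 0, 1   # fib(idx - 1), fib(idx)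
--     idx = 1
--     for i in range(start - 1, end):
--         if i <= 1:
--             parts.append(str(i))
--         else:
--             while idx < i:
--                 prev, cur = cur, prev + cur
--                 idx += 1
--             parts.append(str(cur))
--     return " ".join(parts)
-- ===== Notes on version B (the rewrite author's own statement) =====
-- stated objective: simpler
-- what changed: Replaces the memoized recursive fib helper (closure over a dict, recursion per index) with a single flat loop over range(start-1, end) that carries a rolling (prev, cur) Fibonacci pair across increasing indices, advancing it with an inner while loop; no recursion and no memo dict.
import Mathlib
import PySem

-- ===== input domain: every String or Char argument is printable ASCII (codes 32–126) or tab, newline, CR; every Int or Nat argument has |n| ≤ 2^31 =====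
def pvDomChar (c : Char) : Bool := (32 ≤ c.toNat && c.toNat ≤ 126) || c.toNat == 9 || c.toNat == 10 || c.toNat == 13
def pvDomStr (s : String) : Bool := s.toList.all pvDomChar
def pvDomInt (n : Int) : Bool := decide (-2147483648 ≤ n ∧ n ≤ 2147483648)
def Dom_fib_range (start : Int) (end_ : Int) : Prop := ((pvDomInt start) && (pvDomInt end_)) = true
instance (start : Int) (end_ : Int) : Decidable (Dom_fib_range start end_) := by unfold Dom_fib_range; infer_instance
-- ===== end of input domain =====

-- B replaces A's memoized recursive fib with a flat loop carrying a rolling (prev, cur) Fibonacci pair (objective: simpler/idiomatic).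


-- ===== PORT A =====
-- A's inner 'def fib(n)' with the shared memo dict 'saved' threaded through.
def fibA (n : Int) (saved : PySem.Dict Int Int) : Int × PySem.Dict Int Int :=
  match PySem.Dict.get? saved n with
  | some v => (v, saved)
  | none =>
    if n ≤ 1 then
      (n, PySem.Dict.insert saved n n)
    else
      let p1 := fibA (n - 1) saved
      let p2 := fibA (n - 2) p1.2
      let r := p1.1 + p2.1
      (r, PySem.Dict.insert p2.2 n r)
termination_by n.toNat
decreasing_by all_goals omega

def fib_range (start : Int) (end_ : Int) : String :=
  let fin := (PySem.List.pyRange (start - 1) end_ 1).foldl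
    (fun (st : PySem.Dict Int Int × List String) i =>
      ((fibA i st.1).2, st.2 ++ [PySem.Int.toStr (fibA i st.1).1]))
    (PySem.Dict.empty, [])
  PySem.Str.join " " fin.2

-- ===== PORT B =====
-- the 'while idx < i' loop of Source B; returns (idx, prev, cur)
def whileB (i idx prev cur : Int) : Int × Int × Int :=
  if idx < i then whileB i (idx + 1) cur (prev + cur) else (idx, prev, cur)
termination_by (i - idx).toNat
decreasing_by omega

def fib_range_alt (start : Int) (end_ : Int) : String :=
  let fin := (PySem.List.pyRange (start - 1) end_ 1).foldl
    (fun (st : List String × Int × Int × Int) i =>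
      if i ≤ 1 then (st.1 ++ [PySem.Int.toStr i], st.2.1, st.2.2.1, st.2.2.2)
      else
        (st.1 ++ [PySem.Int.toStr (whileB i st.2.2.2 st.2.1 st.2.2.1).2.2],
         (whileB i st.2.2.2 st.2.1 st.2.2.1).2.1,
         (whileB i st.2.2.2 st.2.1 st.2.2.1).2.2,
         (whileB i st.2.2.2 st.2.1 st.2.2.1).1))
    ([], 0, 1, 1)
  PySem.Str.join " " fin.1

-- ===== PRECONDITION & SPEC =====
-- A's first call fib(start-1) recurses to depth ≈ start before the memo helps, so CPython raises
-- RecursionError once start reaches ≈ 1000 and the range is nonempty; the bound 900 leaves a safety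
-- margin for the environment-dependent recursion limit, so Pre_ also excludes a thin band
-- (900 < start ≲ 999, end_ ≥ start) on which A still returns and B agrees with it.
def Pre_fib_range (start : Int) (end_ : Int) : Prop := end_ < start ∨ start ≤ 900
instance (start : Int) (end_ : Int) : Decidable (Pre_fib_range start end_) := by
  unfold Pre_fib_range; infer_instance

def pvWitness_fib_range : Int × Int := (1, 7)

def Spec_fib_range (start : Int) (end_ : Int) (out : String) : Prop := out = fib_range_alt start end_
instance (start : Int) (end_ : Int) (out : String) : Decidable (Spec_fib_range start end_ out) := by
  unfold Spec_fib_range; infer_instance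

-- ===== CLAIM (what is proved, stated in full; the proofs are below) =====
def Claim_equal_fib_range : Prop := ∀ (start : Int) (end_ : Int), Dom_fib_range start end_ → Pre_fib_range start end_ → Spec_fib_range start end_ (fib_range start end_)

-- ===== LEMMAS AND PROOFS =====

-- mathematical Fibonacci with Python A's convention fib n = n for n ≤ 1
def fibZ (n : Int) : Int :=
  if n ≤ 1 then n else fibZ (n - 1) + fibZ (n - 2)
termination_by n.toNat
decreasing_by all_goals omega

lemma fibZ_le (n : Int) (h : n ≤ 1) : fibZ n = n := by
  unfold fibZ; simp [h]

lemma fibZ_rec (n : Int) (h : 2 ≤ n) : fibZ n = fibZ (n - 1) + fibZ (n - 2) := by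
  rw [fibZ]; simp [show ¬ n ≤ 1 by omega]

-- memo-dict invariant: every stored value is the true Fibonacci value of its key
def GoodMemo (d : PySem.Dict Int Int) : Prop :=
  ∀ k v, PySem.Dict.get? d k = some v → v = fibZ k

lemma goodMemo_insert {d : PySem.Dict Int Int} (hd : GoodMemo d) (k : Int) :
    GoodMemo (PySem.Dict.insert d k (fibZ k)) := by
  intro k' v hget
  rw [PySem.Dict.get?_insert] at hget
  by_cases hk : k' = k
  · subst hk; simp at hget; exact hget.symm
  · simp [hk] at hget; exact hd k' v hget

lemma fibA_correct (n : Int) (d : PySem.Dict Int Int) (hd : GoodMemo d) :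
    (fibA n d).1 = fibZ n ∧ GoodMemo (fibA n d).2 := by
  induction n, d using fibA.induct with
  | case1 n d v hget =>
    have he : fibA n d = (v, d) := by rw [fibA, hget]
    rw [he]
    exact ⟨hd n v hget, hd⟩
  | case2 n d hget h =>
    have he : fibA n d = (n, PySem.Dict.insert d n n) := by
      rw [fibA, hget]; simp [h]
    rw [he]
    refine ⟨(fibZ_le n h).symm, ?_⟩
    have := goodMemo_insert hd n
    rwa [fibZ_le n h] at this
  | case3 n d hget h p1 ih1 ih2 =>
    obtain ⟨e1, g1⟩ := ih1 hd
    obtain ⟨e2, g2⟩ := ih2 g1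
    have hfz : fibZ n = fibZ (n - 1) + fibZ (n - 2) := fibZ_rec n (by omega)
    have he : fibA n d =
        ((fibA (n - 1) d).1 + (fibA (n - 2) (fibA (n - 1) d).2).1,
         PySem.Dict.insert (fibA (n - 2) (fibA (n - 1) d).2).2 n
           ((fibA (n - 1) d).1 + (fibA (n - 2) (fibA (n - 1) d).2).1)) := by
      rw [fibA, hget]; simp [h]
    rw [he]
    refine ⟨by rw [e1, e2, hfz], ?_⟩
    have : ((fibA (n - 1) d).1 + (fibA (n - 2) (fibA (n - 1) d).2).1) = fibZ n := by
      rw [e1, e2, hfz]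
    rw [this]
    exact goodMemo_insert g2 n

-- A's fold appends exactly the fibZ strings
lemma foldA_spec (l : List Int) (d : PySem.Dict Int Int) (acc : List String)
    (hd : GoodMemo d) :
    (l.foldl (fun (st : PySem.Dict Int Int × List String) i =>
        ((fibA i st.1).2, st.2 ++ [PySem.Int.toStr (fibA i st.1).1])) (d, acc)).2
      = acc ++ l.map (fun i => PySem.Int.toStr (fibZ i)) := by
  induction l generalizing d acc with
  | nil => simp
  | cons x xs ih =>
    obtain ⟨hx, hg⟩ := fibA_correct x d hd
    simp only [List.foldl_cons, List.map_cons]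
    rw [ih _ _ hg, hx]
    simp

-- B's while loop advances the rolling pair to index i
lemma whileB_spec (i idx : Int) (h1 : 1 ≤ idx) (h2 : idx ≤ i) :
    whileB i idx (fibZ (idx - 1)) (fibZ idx) = (i, fibZ (i - 1), fibZ i) := by
  by_cases hlt : idx < i
  · rw [whileB]
    simp only [hlt, if_pos]
    have hs : fibZ (idx - 1) + fibZ idx = fibZ (idx + 1) := by
      rw [fibZ_rec (idx + 1) (by omega)]
      have e1 : idx + 1 - 1 = idx := by ring
      have e2 : idx + 1 - 2 = idx - 1 := by ring
      rw [e1, e2]; ring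
    rw [hs, show fibZ idx = fibZ (idx + 1 - 1) by norm_num]
    exact whileB_spec i (idx + 1) (by omega) (by omega)
  · rw [whileB]
    have : idx = i := by omega
    simp [this]
termination_by (i - idx).toNat
decreasing_by omega

-- B's fold appends exactly the fibZ strings
lemma foldB_spec (l : List Int) (idx : Int) (acc : List String)
    (h1 : 1 ≤ idx) (hsorted : l.Pairwise (· < ·)) (hbound : ∀ j ∈ l, 2 ≤ j → idx ≤ j) :
    (l.foldl (fun (st : List String × Int × Int × Int) i =>
        if i ≤ 1 then (st.1 ++ [PySem.Int.toStr i], st.2.1, st.2.2.1, st.2.2.2)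
        else
          (st.1 ++ [PySem.Int.toStr (whileB i st.2.2.2 st.2.1 st.2.2.1).2.2],
           (whileB i st.2.2.2 st.2.1 st.2.2.1).2.1,
           (whileB i st.2.2.2 st.2.1 st.2.2.1).2.2,
           (whileB i st.2.2.2 st.2.1 st.2.2.1).1))
      (acc, fibZ (idx - 1), fibZ idx, idx)).1
      = acc ++ l.map (fun i => PySem.Int.toStr (fibZ i)) := by
  induction l generalizing idx acc with
  | nil => simp
  | cons x xs ih =>
    simp only [List.foldl_cons, List.map_cons]
    rcases List.pairwise_cons.mp hsorted with ⟨hx, hxs⟩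
    by_cases hle : x ≤ 1
    · simp only [hle, if_pos]
      rw [ih idx _ h1 hxs (fun j hj h2 => hbound j (List.mem_cons_of_mem _ hj) h2)]
      simp [fibZ_le x hle]
    · simp only [hle, if_false]
      have h2x : 2 ≤ x := by omega
      have hix : idx ≤ x := hbound x (List.mem_cons_self) h2x
      rw [whileB_spec x idx h1 hix]
      rw [ih x _ (by omega) hxs (fun j hj _ => le_of_lt (hx j hj))]
      simp

-- ===== VERDICT (by name: the statement is the Claim_ definition above) =====
theorem fib_range_spec : Claim_equal_fib_range := by
  intro start end_ _ _
  unfold Spec_fib_range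
  simp only [fib_range, fib_range_alt]
  have hA := foldA_spec (PySem.List.pyRange (start - 1) end_ 1) PySem.Dict.empty []
    (by intro k v h; simp [PySem.Dict.get?_empty] at h)
  have hB := foldB_spec (PySem.List.pyRange (start - 1) end_ 1) 1 [] (by norm_num)
    (PySem.List.pairwise_lt_pyRange_one _ _)
    (fun j _ h2 => by omega)
  simp only [show (1 : Int) - 1 = 0 by norm_num, fibZ_le 0 (by norm_num),
    fibZ_le 1 (by norm_num)] at hB
  rw [hA, hB]
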